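-- pv_equiv track=rewrite | github.com/pypi-data/pypi-mirror-286 | packages/icdutil/icdutil-1.0.0.tar.gz/icdutil-1.0.0/icdutil/num.py | convwidth
-- ===== SOURCE A (Python) =====
-- def convwidth(iterable, srcwidth=32, destwidth=8):
--     """
--     Convert iterable with values of `srcwidth` to list of values of `destwidth`.
--
--     >>> [hex(i) for i in convwidth([0x04030201, 0x08070605], 32, 16)]
--     ['0x201', '0x403', '0x605', '0x807']
--     >>> [hex(i) for i in convwidth([0x0807060504030201], 64, 16)]
--     ['0x201', '0x403', '0x605', '0x807']
--     >>> [hex(i) for i in convwidth([0x0807060504030201], 64, 8)]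
--     ['0x1', '0x2', '0x3', '0x4', '0x5', '0x6', '0x7', '0x8']
--     >>> [hex(i) for i in convwidth([], 32, 16)]
--     []
--
--     >>> [hex(i) for i in convwidth([0x201, 0x403, 0x605, 0x807], 16, 32)]
--     ['0x4030201', '0x8070605']
--     >>> [hex(i) for i in convwidth([0x201, 0x403, 0x605, 0x807], 16, 64)]
--     ['0x807060504030201']
--     >>> [hex(i) for i in convwidth([0x1, 0x2, 0x3, 0x4, 0x5, 0x6, 0x7, 0x8], 8, 64)]
--     ['0x807060504030201']
--     >>> [hex(i) for i in convwidth([0x1, 0x2, 0x3, 0x4, 0x5, 0x6, 0x7, 0x8], 8, 56)]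
--     ['0x7060504030201', '0x8']
--     >>> [hex(i) for i in convwidth([], 16, 32)]
--     []
--
--     >>> [hex(i) for i in convwidth([0x1, 0x2, 0x3, 0x4, 0x5, 0x6, 0x7, 0x8], 8, 8)]
--     ['0x1', '0x2', '0x3', '0x4', '0x5', '0x6', '0x7', '0x8']
--     """
--     if srcwidth > destwidth:
--         # wider to smaller
--         assert (srcwidth % destwidth) == 0
--         mask = (1 << destwidth) - 1
--         iterations = srcwidth // destwidth
--         for item in iterable:
--             for _ in range(iterations):
--                 yield item & mask
--                 item >>= destwidth
--             assert item == 0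
--     elif srcwidth < destwidth:
--         # smaller to wider
--         assert (destwidth % srcwidth) == 0
--         dest = i = 0
--         for item in iterable:
--             dest += item << i
--             i += srcwidth
--             if i == destwidth:
--                 yield dest
--                 dest = i = 0
--         if i != 0:
--             yield dest
--     else:
--         yield from iterable
-- ===== SOURCE B (Python) =====
-- def convwidth(iterable, srcwidth=32, destwidth=8):
--     if srcwidth > destwidth:
--         # wider to smaller: extract each destwidth-chunk by its bit offset
--         assert srcwidth % destwidth == 0
--         n = srcwidth // destwidth
--         mask = (1 << destwidth) - 1
--         for item in iterable:
--             assert 0 <= item < (1 << srcwidth)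
--             for k in range(n):
--                 yield (item >> (k * destwidth)) & mask
--     elif srcwidth < destwidth:
--         # smaller to wider: group into blocks and sum shifted digits
--         assert destwidth % srcwidth == 0
--         g = destwidth // srcwidth
--         items = list(iterable)
--         for start in range(0, len(items), g):
--             block = items[start:start + g]
--             yield sum(x << (j * srcwidth) for j, x in enumerate(block))
--     else:
--         yield from iterable
-- ===== Notes on version B (the rewrite author's own statement) =====
-- stated objective: alternative
-- what changed: Narrowing now extracts each destwidth-chunk by indexed shifts instead of destructively shifting a running item, and widening slices the input into blocks and sums shifted digits per block instead of threading a running accumulator and bit-offset counter through one loop.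
-- outside the precondition, e.g. on convwidth([5], -2, 4): A returns [5], B returns []; on convwidth([], -2, 4): A returns [], B returns []
import Mathlib
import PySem

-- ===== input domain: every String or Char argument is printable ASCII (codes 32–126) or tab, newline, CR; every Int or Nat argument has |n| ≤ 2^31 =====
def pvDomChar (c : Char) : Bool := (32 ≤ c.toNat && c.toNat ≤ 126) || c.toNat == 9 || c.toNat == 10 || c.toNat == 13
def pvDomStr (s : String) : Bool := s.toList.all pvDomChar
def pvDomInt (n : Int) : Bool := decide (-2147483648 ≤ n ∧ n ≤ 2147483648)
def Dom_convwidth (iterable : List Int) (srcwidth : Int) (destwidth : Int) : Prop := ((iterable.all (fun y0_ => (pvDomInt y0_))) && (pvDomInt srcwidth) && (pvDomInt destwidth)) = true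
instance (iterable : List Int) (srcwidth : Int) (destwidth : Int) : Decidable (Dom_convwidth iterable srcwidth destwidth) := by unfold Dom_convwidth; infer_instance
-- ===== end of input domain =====

-- B repacks bit widths by indexed chunk extraction (narrowing) and block-slice sums (widening)
-- instead of A's destructive shift loop and running accumulator/counter; objective: alternative
-- decomposition, same asymptotic cost.  Both Pythons are generators; equivalence is about the
-- yielded sequence (list(...)).

-- ===== PORT A =====
-- inner 'for _ in range(iterations): yield item & mask; item >>= destwidth' of A
def pvNarrowA (mask : Int) (dN : Nat) : Int → Nat → List Int
  | _, 0 => []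
  | item, n+1 => (Int.land item mask) :: pvNarrowA mask dN (item >>> dN) n

-- A's widening loop: state (accumulated yields, dest, i); the trailing 'if i != 0: yield dest'
-- is the [] case.  'item << i' is item <<< i.toNat (inside Pre_ i ≥ 0, where this is exact).
def pvWideA (src dw : Int) : List Int → List Int → Int → Int → List Int
  | [], out, d, i => if i ≠ 0 then out ++ [d] else out
  | x :: rest, out, d, i =>
    let d' := d + (x <<< i.toNat)
    let i' := i + src
    if i' = dw then pvWideA src dw rest (out ++ [d']) 0 0
    else pvWideA src dw rest out d' i'

-- asserts of A are no-ops here; inside Pre_ they never fire.  '1 << destwidth' and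
-- 'srcwidth // destwidth' use .toNat shifts / floordiv, exact inside Pre_ (destwidth ≥ 1).
def convwidth (iterable : List Int) (srcwidth : Int) (destwidth : Int) : List Int :=
  if destwidth < srcwidth then
    let mask : Int := (1 <<< destwidth.toNat) - 1
    let iterations := PySem.Int.floordiv srcwidth destwidth
    iterable.foldl (fun acc item => acc ++ pvNarrowA mask destwidth.toNat item iterations.toNat) []
  else if srcwidth < destwidth then
    pvWideA srcwidth destwidth iterable [] 0 0
  else
    iterable

-- ===== PORT B =====
-- Source B: sum(x << (j * srcwidth) for j, x in enumerate(block)); shift exact inside Pre_ (srcwidth ≥ 1)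
def pvBlockSum (src : Int) (block : List Int) : Int :=
  ((PySem.List.enumerate block).map (fun p : Int × Int => p.2 <<< (p.1 * src).toNat)).sum

def convwidth_alt (iterable : List Int) (srcwidth : Int) (destwidth : Int) : List Int :=
  if destwidth < srcwidth then
    let n := (PySem.Int.floordiv srcwidth destwidth).toNat
    let mask : Int := (1 <<< destwidth.toNat) - 1
    iterable.flatMap (fun (item : Int) => (List.range n).map (fun k => Int.land (item >>> (k * destwidth.toNat)) mask))
  else if srcwidth < destwidth then
    let g := PySem.Int.floordiv destwidth srcwidth
    (PySem.List.pyRange 0 iterable.length g).map (fun start =>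
      pvBlockSum srcwidth (PySem.List.slice iterable (some start) (some (start + g))))
  else
    iterable

-- ===== PRECONDITION & SPEC =====
-- Pre_ excludes inputs where A raises (one width not dividing the other, a nonpositive width in a
-- converting branch, an item outside [0, 2^srcwidth) when narrowing) and the accidental corner of a
-- negative srcwidth dividing destwidth with at most one element, where A returns the input
-- unconverted ([x] or []) out of leftover accumulator state.
def Pre_convwidth (iterable : List Int) (srcwidth : Int) (destwidth : Int) : Prop :=
  (srcwidth = destwidth) ∨
  (destwidth < srcwidth ∧ 1 ≤ destwidth ∧ destwidth ∣ srcwidth ∧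
    ∀ x ∈ iterable, 0 ≤ x ∧ x < 2 ^ srcwidth.toNat) ∨
  (srcwidth < destwidth ∧ 1 ≤ srcwidth ∧ srcwidth ∣ destwidth)
instance (iterable : List Int) (srcwidth : Int) (destwidth : Int) : Decidable (Pre_convwidth iterable srcwidth destwidth) := by unfold Pre_convwidth; infer_instance

def pvWitness_convwidth : List Int × Int × Int := ([3, 1, 2, 0], 4, 8)

def Spec_convwidth (iterable : List Int) (srcwidth : Int) (destwidth : Int) (out : List Int) : Prop := out = convwidth_alt iterable srcwidth destwidth
instance (iterable : List Int) (srcwidth : Int) (destwidth : Int) (out : List Int) : Decidable (Spec_convwidth iterable srcwidth destwidth out) := by unfold Spec_convwidth; infer_instance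

-- ===== CLAIM (what is proved, stated in full; the proofs are below) =====
def Claim_equal_convwidth : Prop := ∀ (iterable : List Int) (srcwidth : Int) (destwidth : Int), Dom_convwidth iterable srcwidth destwidth → Pre_convwidth iterable srcwidth destwidth → Spec_convwidth iterable srcwidth destwidth (convwidth iterable srcwidth destwidth)

-- ===== LEMMAS AND PROOFS =====

theorem pv_shiftR_shiftR (a : Int) (m n : Nat) : a >>> m >>> n = a >>> (m + n) := by
  simp only [Int.shiftRight_eq_div_pow]
  rw [Int.ediv_ediv_of_nonneg (by positivity)]
  congr 1
  push_cast; ring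

theorem pv_shiftR_zero (a : Int) : a >>> (0:Nat) = a := by
  simp [Int.shiftRight_eq_div_pow]

-- A's destructive narrow loop = B's indexed extraction
theorem pvNarrowA_eq (mask : Int) (dN : Nat) :
    ∀ (n : Nat) (item : Int),
      pvNarrowA mask dN item n = (List.range n).map (fun k => Int.land (item >>> (k * dN)) mask) := by
  intro n
  induction n with
  | zero => intro item; simp [pvNarrowA]
  | succ n ih =>
    intro item
    rw [List.range_succ_eq_map]
    simp only [pvNarrowA, List.map_cons, List.map_map, ih]
    refine congrArg₂ _ (by rw [Nat.zero_mul, pv_shiftR_zero]) ?_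
    refine List.map_congr_left (fun k _ => ?_)
    simp only [Function.comp_apply, pv_shiftR_shiftR, Nat.succ_mul, Nat.succ_eq_add_one]
    ring_nf

-- value of a block whose first digit sits at offset j (base 2^m)
def pvBVal (m : Nat) : Nat → List Int → Int
  | _, [] => 0
  | j, x :: t => x * 2 ^ (m * j) + pvBVal m (j+1) t

theorem pvBlockSum_eq (m : Nat) :
    ∀ (ys : List Int) (j : Nat),
      ((PySem.List.enumerate ys (j : Int)).map (fun p : Int × Int => p.2 <<< (p.1 * (m:Int)).toNat)).sum
        = pvBVal m j ys := by
  intro ys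
  induction ys with
  | nil => intro j; simp [PySem.List.enumerate_nil, pvBVal]
  | cons x t ih =>
    intro j
    rw [PySem.List.enumerate_cons]
    simp only [List.map_cons, List.sum_cons, pvBVal]
    have h1 : ((j:Int) * (m:Int)).toNat = m * j := by
      rw [← Nat.cast_mul, Int.toNat_natCast]; ring
    have h2 : ((j:Int) + 1) = ((j+1 : Nat) : Int) := by push_cast; ring
    rw [h1, Int.shiftLeft_eq, h2, ih]

theorem pvBlockSum_bval (m : Nat) (ys : List Int) :
    pvBlockSum (m:Int) ys = pvBVal m 0 ys := by
  have := pvBlockSum_eq m ys 0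
  simpa [pvBlockSum] using this

-- A's widening loop, partially through a block: j digits already absorbed into dacc
theorem pvWideA_partial (m gN : Nat) (hm : 1 ≤ m) :
    ∀ (ys out : List Int) (dacc : Int) (j : Nat), j < gN →
      pvWideA (m:Int) ((m*gN : Nat):Int) ys out dacc ((m:Int) * (j:Nat)) =
        if gN ≤ ys.length + j then
          pvWideA (m:Int) ((m*gN:Nat):Int) (ys.drop (gN - j))
            (out ++ [dacc + pvBVal m j (ys.take (gN - j))]) 0 0
        else if ys = [] ∧ j = 0 then out else out ++ [dacc + pvBVal m j ys] := by
  intro ys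
  induction ys with
  | nil =>
    intro out dacc j hj
    have hcond : ¬ gN ≤ ([] : List Int).length + j := by simp; omega
    rw [if_neg hcond]
    by_cases hj0 : j = 0
    · subst hj0
      simp [pvWideA]
    · have : ((m:Int) * (j:Nat)) ≠ 0 := by
        simp only [ne_eq, mul_eq_zero, not_or]
        exact ⟨by exact_mod_cast (by omega : (m:Nat) ≠ 0), by exact_mod_cast hj0⟩
      simp [pvWideA, this, hj0, pvBVal]
  | cons x t ih =>
    intro out dacc j hj
    have hd' : ((m:Int) * (j:Nat)).toNat = m * j := by
      rw [← Nat.cast_mul, Int.toNat_natCast]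
    have hi' : (m:Int) * (j:Nat) + (m:Int) = (m:Int) * ((j+1 : Nat):Int) := by push_cast; ring
    have hsplit : ((m:Int) * ((j+1 : Nat):Int) = ((m*gN : Nat):Int)) ↔ j + 1 = gN := by
      constructor
      · intro h
        have : (m : Int) * ((j+1 : Nat):Int) = (m:Int) * ((gN:Nat):Int) := by push_cast at h ⊢; linarith
        have := mul_left_cancel₀ (by exact_mod_cast (by omega : (m:Nat) ≠ 0) : (m:Int) ≠ 0) this
        exact_mod_cast this
      · intro h; subst h; push_cast; ring
    show (if ((m:Int) * (j:Nat) + (m:Int) = ((m*gN : Nat):Int)) then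
            pvWideA _ _ t (out ++ [dacc + (x <<< ((m:Int) * (j:Nat)).toNat)]) 0 0
          else pvWideA _ _ t out (dacc + (x <<< ((m:Int) * (j:Nat)).toNat)) ((m:Int) * (j:Nat) + (m:Int))) = _
    rw [hi', hd', Int.shiftLeft_eq]
    by_cases hlast : j + 1 = gN
    · rw [if_pos (hsplit.mpr hlast)]
      have h1 : gN - j = 1 := by omega
      have hcond : gN ≤ (x :: t).length + j := by simp; omega
      rw [if_pos hcond, h1]
      simp [pvBVal]
    · rw [if_neg (fun h => hlast (hsplit.mp h))]
      rw [ih out (dacc + x * 2 ^ (m * j)) (j+1) (by omega)]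
      have hc : (gN ≤ t.length + (j+1)) ↔ (gN ≤ (x :: t).length + j) := by simp; omega
      by_cases hcond : gN ≤ (x :: t).length + j
      · rw [if_pos (hc.mpr hcond), if_pos hcond]
        have h2 : gN - j = (gN - (j+1)) + 1 := by omega
        rw [h2, List.drop_succ_cons, List.take_succ_cons]
        simp [pvBVal, add_assoc]
      · rw [if_neg (fun h => hcond (hc.mp h)), if_neg hcond]
        rw [if_neg (by omega : ¬ (t = [] ∧ j + 1 = 0)), if_neg (by simp : ¬ ((x :: t) = [] ∧ j = 0))]
        simp [pvBVal, add_assoc]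

-- B's chunking, as a recursion (block size g1+1)
def pvChunks (m g1 : Nat) : List Int → List Int
  | [] => []
  | x :: t => pvBVal m 0 (x :: t.take g1) :: pvChunks m g1 (t.drop g1)
  termination_by ys => ys.length
  decreasing_by simp

theorem pvChunks_nil (m g1 : Nat) : pvChunks m g1 [] = [] := by rw [pvChunks.eq_def]
theorem pvChunks_cons (m g1 : Nat) (x : Int) (t : List Int) :
    pvChunks m g1 (x :: t) = pvBVal m 0 (x :: t.take g1) :: pvChunks m g1 (t.drop g1) := by
  rw [pvChunks.eq_def]

-- A's widening loop produces exactly the chunk values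
theorem pvWideA_chunks (m g1 : Nat) (hm : 1 ≤ m) :
    ∀ (N : Nat) (ys : List Int), ys.length ≤ N → ∀ out,
      pvWideA (m:Int) ((m*(g1+1) : Nat):Int) ys out 0 0 = out ++ pvChunks m g1 ys := by
  intro N
  induction N with
  | zero =>
    intro ys hys out
    have : ys = [] := List.eq_nil_of_length_eq_zero (by omega)
    subst this; rw [pvChunks_nil]; simp [pvWideA]
  | succ N ih =>
    intro ys hys out
    match ys with
    | [] => rw [pvChunks_nil]; simp [pvWideA]
    | x :: t =>
      have := pvWideA_partial m (g1+1) hm (x :: t) out 0 0 (by omega)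
      rw [show ((m:Int) * ((0:Nat):Int)) = 0 by simp] at this
      rw [this]
      have hlt : t.length ≤ N := by simpa using hys
      have hdrop : (x :: t).drop (g1 + 1 - 0) = t.drop g1 := List.drop_succ_cons
      have htake : (x :: t).take (g1 + 1 - 0) = x :: t.take g1 := List.take_succ_cons
      by_cases hcond : g1 + 1 ≤ (x :: t).length + 0
      · rw [if_pos hcond]
        rw [hdrop, htake, ih (t.drop g1) (by simp [List.length_drop]; omega) _]
        rw [pvChunks_cons]
        simp
      · rw [if_neg hcond, if_neg (by simp)]
        have hsmall : t.length < g1 := by simp at hcond; omega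
        rw [pvChunks_cons]
        rw [List.take_of_length_le (by omega), List.drop_of_length_le (by omega), pvChunks_nil]
        simp

-- the number of blocks, as pyRange_of_pos computes it
theorem pv_count_succ (L g : Nat) (hg : 1 ≤ g) (hL : 1 ≤ L) :
    (L + g - 1) / g = (L - g + g - 1) / g + 1 := by
  rcases Nat.le_total L g with h | h
  · have h1 : L + g - 1 = (L - 1) + g := by omega
    rw [h1, Nat.add_div_right _ (by omega)]
    have : (L - 1) / g = 0 := Nat.div_eq_of_lt (by omega)
    have h2 : L - g = 0 := by omega
    rw [this, h2]
    rw [Nat.div_eq_of_lt (by omega)]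
  · have h1 : L + g - 1 = ((L - g) + g - 1) + g := by omega
    rw [h1, Nat.add_div_right _ (by omega)]

-- B's widening branch = the chunk recursion
theorem pvB_chunks (m g1 : Nat) :
    ∀ (N : Nat) (ys : List Int), ys.length ≤ N →
      (PySem.List.pyRange 0 (ys.length : Int) ((g1+1 : Nat):Int)).map (fun start =>
        pvBlockSum (m:Int) (PySem.List.slice ys (some start) (some (start + ((g1+1 : Nat):Int)))))
      = pvChunks m g1 ys := by
  intro N
  induction N with
  | zero =>
    intro ys hys
    have : ys = [] := List.eq_nil_of_length_eq_zero (by omega)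
    subst this
    rw [PySem.List.pyRange_of_pos _ _ (by exact_mod_cast Nat.succ_pos g1)]
    simp [pvChunks]
  | succ N ih =>
    intro ys hys
    match ys with
    | [] =>
      rw [PySem.List.pyRange_of_pos _ _ (by exact_mod_cast Nat.succ_pos g1)]
      simp [pvChunks]
    | x :: t =>
      set g : Nat := g1 + 1 with hgdef
      set L : Nat := (x :: t).length with hLdef
      have hL1 : 1 ≤ L := by simp [hLdef]
      have hcnt : (((L:Int) - 0 + (g:Int) - 1) / (g:Int)).toNat = (L + g - 1) / g := by
        have : ((L:Int) - 0 + (g:Int) - 1) = (((L + g - 1 : Nat)) : Int) := by omega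
        rw [this, ← Int.natCast_div, Int.toNat_natCast]
      have hcnt' : ∀ (zs : List Int), (((zs.length:Int) - 0 + (g:Int) - 1) / (g:Int)).toNat = (zs.length + g - 1) / g := by
        intro zs
        have : ((zs.length:Int) - 0 + (g:Int) - 1) = (((zs.length + g - 1 : Nat)) : Int) := by omega
        rw [this, ← Int.natCast_div, Int.toNat_natCast]
      rw [PySem.List.pyRange_of_pos _ _ (by exact_mod_cast Nat.succ_pos g1 : (0:Int) < ((g:Nat):Int))]
      rw [if_pos (by exact_mod_cast hL1 : (0:Int) < (L:Int))]
      rw [hcnt, pv_count_succ L g (by omega) hL1]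
      have hlen_drop : (t.drop g1).length = L - g := by simp [hLdef, hgdef]
      rw [List.range_succ_eq_map]
      simp only [List.map_cons, List.map_map]
      rw [pvChunks_cons]
      refine congrArg₂ _ ?_ ?_
      · -- head block
        have : (0 : Int) + (g:Int) * ((0:Nat):Int) = ((0:Nat):Int) := by simp
        rw [this]
        have hsl : PySem.List.slice (x :: t) (some ((0:Nat):Int)) (some (((0:Nat):Int) + (g:Int))) = (x :: t).take g := by
          rw [PySem.List.slice_natCast_add]
          simp
        rw [hsl]
        have : (x :: t).take g = x :: t.take g1 := by simp [hgdef]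
        rw [this, pvBlockSum_bval]
      · -- tail blocks
        have hlt : t.length ≤ N := by simpa [hLdef] using hys
        rw [← ih (t.drop g1) (by simp [List.length_drop]; omega)]
        rw [PySem.List.pyRange_of_pos _ _ (by exact_mod_cast Nat.succ_pos g1 : (0:Int) < ((g:Nat):Int))]
        rw [hcnt' (t.drop g1), hlen_drop]
        by_cases hpos : 0 < L - g
        · rw [if_pos (by exact_mod_cast hpos : (0:Int) < ((L - g : Nat):Int))]
          rw [List.map_map]
          refine List.map_congr_left (fun k _ => ?_)
          simp only [Function.comp_apply]
          have e1 : (0:Int) + (g:Int) * ((Nat.succ k : Nat):Int) = (((g * (k+1)) : Nat):Int) := by push_cast; ring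
          have e2 : (0:Int) + (g:Int) * ((k : Nat):Int) = (((g * k) : Nat):Int) := by push_cast; ring
          rw [e1, e2]
          have s1 : PySem.List.slice (x :: t) (some (((g*(k+1)) : Nat):Int)) (some ((((g*(k+1)) : Nat):Int) + (g:Int))) = ((x :: t).drop (g*(k+1))).take g := by
            have : (((g*(k+1)) : Nat):Int) + (g:Int) = (((g*(k+1)) : Nat):Int) + ((g:Nat):Int) := by push_cast; ring
            rw [this, PySem.List.slice_natCast_add]
          have s2 : PySem.List.slice (t.drop g1) (some (((g*k) : Nat):Int)) (some ((((g*k) : Nat):Int) + (g:Int))) = (((t.drop g1)).drop (g*k)).take g := by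
            have : (((g*k) : Nat):Int) + (g:Int) = (((g*k) : Nat):Int) + ((g:Nat):Int) := by push_cast; ring
            rw [this, PySem.List.slice_natCast_add]
          rw [s1, s2]
          have : (x :: t).drop (g * (k+1)) = (t.drop g1).drop (g * k) := by
            rw [List.drop_drop]
            rw [show g * (k+1) = (g1 + g * k) + 1 by rw [hgdef]; ring]
            exact List.drop_succ_cons
          rw [this]
        · have hz : L - g = 0 := by omega
          rw [hz, if_neg (by simp)]
          rw [show (0 + g - 1) / g = 0 from Nat.div_eq_of_lt (by omega)]
          simp

-- ===== VERDICT (by name: the statement is the Claim_ definition above) =====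
theorem convwidth_spec : Claim_equal_convwidth := by
  intro it s d _ hpre
  unfold Spec_convwidth convwidth convwidth_alt
  rcases hpre with heq | ⟨hlt, hd1, hdvd, _⟩ | ⟨hlt, hs1, hdvd⟩
  · subst heq
    simp
  · simp only [if_pos hlt]
    rw [PySem.List.foldl_append_eq_flatMap]
    simp only [List.nil_append]
    refine congrArg (fun f => List.flatMap f it) ?_
    funext item
    exact pvNarrowA_eq _ _ _ item
  · simp only [if_neg (show ¬ d < s by omega), if_pos hlt]
    -- src = m, dest = m * gN with gN ≥ 1
    obtain ⟨m, hm⟩ : ∃ m : Nat, s = (m:Int) := ⟨s.toNat, (Int.toNat_of_nonneg (by omega)).symm⟩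
    have hm1 : 1 ≤ m := by omega
    have hgpos : 0 < d / s := Int.ediv_pos_of_pos_of_dvd (by omega) (by omega) hdvd
    obtain ⟨gN, hgN⟩ : ∃ gN : Nat, d / s = (gN:Int) := ⟨(d/s).toNat, (Int.toNat_of_nonneg (by omega)).symm⟩
    have hgN1 : 1 ≤ gN := by omega
    obtain ⟨g1, rfl⟩ : ∃ g1, gN = g1 + 1 := ⟨gN - 1, by omega⟩
    have hfl : PySem.Int.floordiv d s = ((g1 + 1 : Nat) : Int) := by
      rw [PySem.Int.floordiv_eq_ediv_of_pos (by omega), hgN]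
    have hdval : d = ((m * (g1 + 1) : Nat) : Int) := by
      have h := Int.ediv_mul_cancel hdvd
      rw [← h, hgN, hm]
      push_cast
      ring
    rw [hfl, hm, hdval]
    rw [pvWideA_chunks m g1 hm1 it.length it (le_refl _) [], List.nil_append]
    exact (pvB_chunks m g1 it.length it (le_refl _)).symm
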